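-- pv_equiv track=rewrite | github.com/CitizenGardens-org/atlas-embeddings | tools/uor-specgen.py | _fallback_yaml_parse
-- ===== SOURCE A (Python) =====
-- from typing import Dict, Iterable, List, Tuple
--
-- def _fallback_yaml_parse(lines: Iterable[str]) -> Dict:
--     invariants: List[Dict[str, str]] = []
--     current: Dict[str, str] | None = None
--     for line in lines:
--         stripped = line.strip()
--         if not stripped or stripped.startswith("#"):
--             continue
--         if stripped.startswith("- id:"):
--             if current:
--                 invariants.append(current)
--             current = {"id": stripped.split(":", 1)[1].strip()}
--         elif ":" in stripped and current is not None:
--             key, value = stripped.split(":", 1)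
--             current[key.strip()] = value.strip()
--     if current:
--         invariants.append(current)
--     return {"invariants": invariants}
-- ===== SOURCE B (Python) =====
-- def _fallback_yaml_parse(lines):
--     # Pass 1: group stripped content lines into blocks, one per '- id:' header.
--     blocks = []
--     for line in lines:
--         s = line.strip()
--         if not s or s.startswith("#"):
--             continue
--         if s.startswith("- id:"):
--             blocks.append([s])
--         elif blocks:
--             blocks[-1].append(s)
--     # Pass 2: turn each block into a dict.
--     invariants = []
--     for block in blocks:
--         d = {"id": block[0].split(":", 1)[1].strip()}
--         for rest in block[1:]:
--             if ":" in rest: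
--                 key, value = rest.split(":", 1)
--                 d[key.strip()] = value.strip()
--         invariants.append(d)
--     return {"invariants": invariants}
-- ===== Notes on version B (the rewrite author's own statement) =====
-- stated objective: alternative
-- what changed: Replaces the single accumulator-flush loop carrying an optional current dict with two separate passes: one that groups content lines into per-header blocks, and one that converts each block into a dict.
import Mathlib
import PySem

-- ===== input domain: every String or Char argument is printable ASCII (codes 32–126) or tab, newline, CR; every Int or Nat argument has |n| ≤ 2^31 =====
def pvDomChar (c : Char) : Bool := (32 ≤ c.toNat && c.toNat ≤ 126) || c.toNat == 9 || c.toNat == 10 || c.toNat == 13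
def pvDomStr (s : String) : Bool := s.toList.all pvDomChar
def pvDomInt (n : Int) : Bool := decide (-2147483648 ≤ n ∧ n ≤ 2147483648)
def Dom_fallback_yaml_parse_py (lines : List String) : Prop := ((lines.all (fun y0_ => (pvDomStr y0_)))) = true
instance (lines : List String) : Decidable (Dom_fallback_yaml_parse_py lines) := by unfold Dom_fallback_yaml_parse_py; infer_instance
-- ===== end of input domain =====

-- B re-implements the parser as two passes (group lines into blocks, then parse each block)
-- instead of A's single accumulator-flush loop; same cost, different decomposition.

-- Shared small helpers for the literal Python expressions both sources contain:
-- s.split(":", 1)[1].strip()   (used only when ":" is in s, so the pattern matches)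
def pvHeaderId (s : String) : String :=
  match PySem.Str.splitMax? s ":" 1 with
  | some (_ :: v :: _) => PySem.Str.strip v
  | _ => ""   -- unreachable: callers guarantee ":" occurs in s

-- key, value = s.split(":", 1); (key.strip(), value.strip())
def pvKV (s : String) : String × String :=
  match PySem.Str.splitMax? s ":" 1 with
  | some (k :: v :: _) => (PySem.Str.strip k, PySem.Str.strip v)
  | _ => ("", "")   -- unreachable: callers guarantee ":" occurs in s

-- ===== PORT A =====
-- `if current:` — Python truthiness of Optional[dict]
def pvFlushA (invs : List (PySem.Dict String String)) (cur : Option (PySem.Dict String String)) :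
    List (PySem.Dict String String) :=
  match cur with
  | some c => if c.items = [] then invs else invs ++ [c]
  | none => invs

def pvGoA : List String → List (PySem.Dict String String) → Option (PySem.Dict String String) →
    List (PySem.Dict String String)
  | [], invs, cur => pvFlushA invs cur
  | l :: ls, invs, cur =>
    let s := PySem.Str.strip l
    if s = "" || PySem.Str.startswith s "#" then pvGoA ls invs cur
    else if PySem.Str.startswith s "- id:" then
      pvGoA ls (pvFlushA invs cur) (some ((PySem.Dict.empty).insert "id" (pvHeaderId s)))
    else if PySem.Str.isIn ":" s then
      match cur with
      | some c => pvGoA ls invs (some (c.insert (pvKV s).1 (pvKV s).2))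
      | none => pvGoA ls invs cur
    else pvGoA ls invs cur

def fallback_yaml_parse_py (lines : List String) : List (String × List (List (String × String))) :=
  [("invariants", (pvGoA lines [] none).map (fun d => d.items))]

-- ===== PORT B =====
-- pass 1: blocks[-1].append(s) / blocks.append([s])
def pvPass1 : List String → List (List String) → List (List String)
  | [], blocks => blocks
  | l :: ls, blocks =>
    let s := PySem.Str.strip l
    if s = "" || PySem.Str.startswith s "#" then pvPass1 ls blocks
    else if PySem.Str.startswith s "- id:" then pvPass1 ls (blocks ++ [[s]])
    else if blocks = [] then pvPass1 ls blocks
    else pvPass1 ls (blocks.dropLast ++ [blocks.getLastD [] ++ [s]])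

-- pass 2, inner loop body: if ":" in rest: d[key.strip()] = value.strip()
def pvAddLine (d : PySem.Dict String String) (s : String) : PySem.Dict String String :=
  if PySem.Str.isIn ":" s then d.insert (pvKV s).1 (pvKV s).2 else d

def pvParseBlock : List String → PySem.Dict String String
  | [] => PySem.Dict.empty   -- unreachable: every block starts with its header line
  | h :: t => t.foldl pvAddLine ((PySem.Dict.empty).insert "id" (pvHeaderId h))

def fallback_yaml_parse_py_alt (lines : List String) : List (String × List (List (String × String))) :=
  [("invariants", ((pvPass1 lines []).map pvParseBlock).map (fun d => d.items))]

-- ===== PRECONDITION & SPEC =====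
def Spec_fallback_yaml_parse_py (lines : List String) (out : List (String × List (List (String × String)))) : Prop := out = fallback_yaml_parse_py_alt lines
instance (lines : List String) (out : List (String × List (List (String × String)))) : Decidable (Spec_fallback_yaml_parse_py lines out) := by unfold Spec_fallback_yaml_parse_py; infer_instance

-- ===== CLAIM (what is proved, stated in full; the proofs are below) =====
def Claim_equal_fallback_yaml_parse_py : Prop := ∀ (lines : List String), Dom_fallback_yaml_parse_py lines → Spec_fallback_yaml_parse_py lines (fallback_yaml_parse_py lines)

-- ===== LEMMAS AND PROOFS =====

lemma insert_items_ne_nil (d : PySem.Dict String String) (k v : String)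
    (h : d.items ≠ []) : (d.insert k v).items ≠ [] := by
  rw [PySem.Dict.items_insert]
  split <;> simp_all

lemma foldl_addLine_items_ne_nil (t : List String) : ∀ (d : PySem.Dict String String),
    d.items ≠ [] → (t.foldl pvAddLine d).items ≠ [] := by
  induction t with
  | nil => intro d h; simpa using h
  | cons s t ih =>
    intro d h
    simp only [List.foldl_cons]
    apply ih
    unfold pvAddLine
    split
    · exact insert_items_ne_nil d _ _ h
    · exact h

lemma parseBlock_items_ne_nil (hd : String) (t : List String) :
    (pvParseBlock (hd :: t)).items ≠ [] := by
  unfold pvParseBlock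
  apply foldl_addLine_items_ne_nil
  rw [PySem.Dict.items_insert]
  simp [PySem.Dict.contains_empty]

lemma pass1_cons (ls : List String) : ∀ (b : List String) (bs : List (List String)), bs ≠ [] →
    pvPass1 ls (b :: bs) = b :: pvPass1 ls bs := by
  induction ls with
  | nil => intro b bs _; rfl
  | cons l ls ih =>
    intro b bs hbs
    obtain ⟨x, xs, rfl⟩ : ∃ x xs, bs = x :: xs := by
      cases bs with
      | nil => exact absurd rfl hbs
      | cons x xs => exact ⟨x, xs, rfl⟩
    simp only [pvPass1]
    split_ifs <;> (apply ih; simp)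

lemma parseBlock_snoc (hd : String) (t : List String) (s : String) :
    pvParseBlock (hd :: (t ++ [s])) = pvAddLine (pvParseBlock (hd :: t)) s := by
  simp [pvParseBlock, List.foldl_append]

lemma goA_some (ls : List String) : ∀ (invs : List (PySem.Dict String String)) (hd : String) (t : List String),
    pvGoA ls invs (some (pvParseBlock (hd :: t))) =
      invs ++ (pvPass1 ls [hd :: t]).map pvParseBlock := by
  induction ls with
  | nil =>
    intro invs hd t
    simp only [pvGoA, pvPass1, pvFlushA, List.map_cons, List.map_nil]
    rw [if_neg (parseBlock_items_ne_nil hd t)]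
  | cons l ls ih =>
    intro invs hd t
    simp only [pvGoA, pvPass1]
    by_cases h1 : (decide (PySem.Str.strip l = "") || PySem.Str.startswith (PySem.Str.strip l) "#") = true
    · rw [if_pos h1, if_pos h1]
      exact ih invs hd t
    · rw [if_neg h1, if_neg h1]
      by_cases h2 : PySem.Str.startswith (PySem.Str.strip l) "- id:" = true
      · rw [if_pos h2, if_pos h2]
        have hflush : pvFlushA invs (some (pvParseBlock (hd :: t))) = invs ++ [pvParseBlock (hd :: t)] := by
          simp only [pvFlushA]
          rw [if_neg (parseBlock_items_ne_nil hd t)]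
        rw [hflush,
            show (PySem.Dict.empty).insert "id" (pvHeaderId (PySem.Str.strip l))
               = pvParseBlock [PySem.Str.strip l] from rfl,
            ih (invs ++ [pvParseBlock (hd :: t)]) (PySem.Str.strip l) [],
            show ([hd :: t] : List (List String)) ++ [[PySem.Str.strip l]]
               = (hd :: t) :: [[PySem.Str.strip l]] from rfl,
            pass1_cons ls (hd :: t) [[PySem.Str.strip l]] (by simp)]
        simp
      · rw [if_neg h2, if_neg h2,
            if_neg (by simp : ¬(([hd :: t] : List (List String)) = [])),
            show ([hd :: t] : List (List String)).dropLast ++ [([hd :: t] : List (List String)).getLastD [] ++ [PySem.Str.strip l]]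
               = [hd :: (t ++ [PySem.Str.strip l])] by simp]
        by_cases h3 : PySem.Str.isIn ":" (PySem.Str.strip l) = true
        · rw [if_pos h3]
          show pvGoA ls invs (some ((pvParseBlock (hd :: t)).insert (pvKV (PySem.Str.strip l)).1 (pvKV (PySem.Str.strip l)).2)) = _
          rw [show (pvParseBlock (hd :: t)).insert (pvKV (PySem.Str.strip l)).1 (pvKV (PySem.Str.strip l)).2
                 = pvParseBlock (hd :: (t ++ [PySem.Str.strip l])) by
              rw [parseBlock_snoc]; simp only [pvAddLine, if_pos h3]]
          exact ih invs hd (t ++ [PySem.Str.strip l])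
        · rw [if_neg h3]
          show pvGoA ls invs (some (pvParseBlock (hd :: t))) = _
          rw [show pvParseBlock (hd :: t) = pvParseBlock (hd :: (t ++ [PySem.Str.strip l])) by
              rw [parseBlock_snoc]; simp only [pvAddLine, if_neg h3]]
          exact ih invs hd (t ++ [PySem.Str.strip l])

lemma goA_none (ls : List String) : ∀ (invs : List (PySem.Dict String String)),
    pvGoA ls invs none = invs ++ (pvPass1 ls []).map pvParseBlock := by
  induction ls with
  | nil => intro invs; simp [pvGoA, pvPass1, pvFlushA]
  | cons l ls ih =>
    intro invs
    simp only [pvGoA, pvPass1]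
    by_cases h1 : (decide (PySem.Str.strip l = "") || PySem.Str.startswith (PySem.Str.strip l) "#") = true
    · rw [if_pos h1, if_pos h1]; exact ih invs
    · rw [if_neg h1, if_neg h1]
      by_cases h2 : PySem.Str.startswith (PySem.Str.strip l) "- id:" = true
      · rw [if_pos h2, if_pos h2,
            show pvFlushA invs none = invs from rfl,
            show (PySem.Dict.empty).insert "id" (pvHeaderId (PySem.Str.strip l))
               = pvParseBlock [PySem.Str.strip l] from rfl,
            goA_some ls invs (PySem.Str.strip l) []]
        rfl
      · rw [if_neg h2, if_neg h2, if_pos trivial, ite_self]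
        exact ih invs

-- ===== VERDICT (by name: the statement is the Claim_ definition above) =====
theorem fallback_yaml_parse_py_spec : Claim_equal_fallback_yaml_parse_py := by
  intro lines _
  unfold Spec_fallback_yaml_parse_py fallback_yaml_parse_py fallback_yaml_parse_py_alt
  rw [goA_none]
  rfl
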